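-- pv_equiv track=rewrite | github.com/KIMMIJIDLQSLEK/algorithm | 프로그래머스/lv2/62048. 멀쩡한 사각형/멀쩡한 사각형.py | solution
-- ===== SOURCE A (Python) =====
-- def solution(w, h):
--     answer = 0
--     for i in range(min(w, h), 0, -1):
--         if w % i == 0 and h % i == 0:
--             answer = i
--             break
--     result=w*h-(w+h-answer)
--     return result
-- ===== SOURCE B (Python) =====
-- def solution(w, h):
--     g = 0
--     if w > 0 and h > 0:
--         a, b = w, h
--         while b:
--             a, b = b, a % b
--         g = a
--     return w * h - (w + h - g)
-- ===== Notes on version B (the rewrite author's own statement) =====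
-- stated objective: faster
-- what changed: Replaces the descending divisor-search loop (testing every candidate from min(w,h) down to the gcd) with the Euclidean remainder algorithm; a guard returns 0 when either side is nonpositive, matching A's empty-range case.
import Mathlib
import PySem

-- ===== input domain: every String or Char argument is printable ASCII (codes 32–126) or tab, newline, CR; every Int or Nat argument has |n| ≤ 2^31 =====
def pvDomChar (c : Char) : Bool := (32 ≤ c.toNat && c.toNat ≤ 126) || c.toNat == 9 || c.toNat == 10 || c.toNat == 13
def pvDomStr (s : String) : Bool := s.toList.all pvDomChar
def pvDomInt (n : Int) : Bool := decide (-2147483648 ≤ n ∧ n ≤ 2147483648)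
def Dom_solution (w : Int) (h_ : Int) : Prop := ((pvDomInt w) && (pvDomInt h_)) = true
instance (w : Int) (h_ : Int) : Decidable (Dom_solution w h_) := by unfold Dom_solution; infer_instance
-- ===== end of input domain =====

-- B replaces A's descending divisor-search loop with the Euclidean remainder algorithm
-- (asymptotically fewer iterations); the return value is proved identical for all inputs.


-- ===== PORT A =====
-- 'for i in range(min(w,h), 0, -1): if w%i==0 and h%i==0: answer=i; break' — first i dividing both, else the initial 0
def solutionLoop (w : Int) (h_ : Int) : List Int → Int
  | [] => 0
  | i :: rest =>
    if PySem.Int.mod w i = 0 ∧ PySem.Int.mod h_ i = 0 then i else solutionLoop w h_ rest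

def solution (w : Int) (h_ : Int) : Int :=
  let answer := solutionLoop w h_ (PySem.List.pyRange (min w h_) 0 (-1))
  w * h_ - (w + h_ - answer)

-- ===== PORT B =====
-- termination fact for B's while loop: |a % b| < |b| when b ≠ 0 (Python mod)
theorem pymod_natAbs_lt (a b : Int) (hb : b ≠ 0) :
    (PySem.Int.mod a b).natAbs < b.natAbs := by
  rcases lt_or_gt_of_ne hb with hneg | hpos
  · have h1 := PySem.Int.mod_neg_bounds a hneg
    omega
  · have h1 := PySem.Int.mod_nonneg a hpos
    have h2 := PySem.Int.mod_lt a hpos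
    omega

-- 'a, b = w, h; while b: a, b = b, a % b' — returns a
def euclid (a b : Int) : Int :=
  if hb : b ≠ 0 then euclid b (PySem.Int.mod a b) else a
termination_by b.natAbs
decreasing_by exact pymod_natAbs_lt a b hb

def solution_alt (w : Int) (h_ : Int) : Int :=
  let g := if w > 0 ∧ h_ > 0 then euclid w h_ else 0
  w * h_ - (w + h_ - g)

-- ===== PRECONDITION & SPEC =====
def Spec_solution (w : Int) (h_ : Int) (out : Int) : Prop := out = solution_alt w h_
instance (w : Int) (h_ : Int) (out : Int) : Decidable (Spec_solution w h_ out) := by unfold Spec_solution; infer_instance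

-- ===== CLAIM (what is proved, stated in full; the proofs are below) =====
def Claim_equal_solution : Prop := ∀ (w : Int) (h_ : Int), Dom_solution w h_ → Spec_solution w h_ (solution w h_)

-- ===== LEMMAS AND PROOFS =====

-- Euclid computes the gcd on nonnegative arguments
theorem euclid_eq_gcd (a b : Int) (ha : 0 ≤ a) (hb : 0 ≤ b) :
    euclid a b = (Int.gcd a b : Int) := by
  rw [euclid]
  split_ifs with h
  · have hbpos : 0 < b := lt_of_le_of_ne hb (Ne.symm h)
    rw [PySem.Int.mod_eq_emod_of_pos hbpos,
      euclid_eq_gcd b (a % b) hb (Int.emod_nonneg a h), Int.gcd_comm b, Int.gcd_emod]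
  · push Not at h
    subst h
    simp [Int.natAbs_of_nonneg ha]
termination_by b.natAbs
decreasing_by
  have h1 := Int.emod_nonneg a h
  have h2 := Int.emod_lt_of_pos a (lt_of_le_of_ne hb (Ne.symm h))
  omega

-- A's descending loop, started at or above the gcd, stops exactly at the gcd
theorem loop_eq_gcd (w h_ : Int) (hw : 0 < w) (hh : 0 < h_) (m : Int)
    (hg : (Int.gcd w h_ : Int) ≤ m) :
    solutionLoop w h_ (PySem.List.pyRange m 0 (-1)) = (Int.gcd w h_ : Int) := by
  have hgpos : 0 < (Int.gcd w h_ : Int) := by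
    have h0 : Int.gcd w h_ ≠ 0 := fun hz => by
      have := Int.gcd_eq_zero_iff.mp hz
      omega
    omega
  have hm : (0 : Int) < m := lt_of_lt_of_le hgpos hg
  rw [PySem.List.pyRange_neg_one_cons hm, solutionLoop]
  split_ifs with hdvd
  · -- m divides both, hence m ∣ gcd, hence m ≤ gcd; with gcd ≤ m, m = gcd
    have h1 : m ∣ w := (PySem.Int.mod_eq_zero_iff_dvd w m).mp hdvd.1
    have h2 : m ∣ h_ := (PySem.Int.mod_eq_zero_iff_dvd h_ m).mp hdvd.2
    have h3 : m.natAbs ∣ Int.gcd w h_ :=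
      Nat.dvd_gcd (Int.natAbs_dvd_natAbs.mpr h1) (Int.natAbs_dvd_natAbs.mpr h2)
    have h4 := Nat.le_of_dvd (by omega) h3
    omega
  · -- m is not a common divisor, so gcd < m; recurse on m - 1
    have hne : (Int.gcd w h_ : Int) ≠ m := by
      intro he
      apply hdvd
      constructor
      · exact (PySem.Int.mod_eq_zero_iff_dvd w m).mpr (he ▸ Int.gcd_dvd_left w h_)
      · exact (PySem.Int.mod_eq_zero_iff_dvd h_ m).mpr (he ▸ Int.gcd_dvd_right w h_)
    exact loop_eq_gcd w h_ hw hh (m - 1) (by omega)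
termination_by m.toNat
decreasing_by omega

-- ===== VERDICT (by name: the statement is the Claim_ definition above) =====
theorem solution_spec : Claim_equal_solution := by
  intro w h_ _
  unfold Spec_solution solution solution_alt
  by_cases hp : w > 0 ∧ h_ > 0
  · obtain ⟨hw, hh⟩ := hp
    have hgw : (Int.gcd w h_ : Int) ≤ w := Int.le_of_dvd hw (Int.gcd_dvd_left w h_)
    have hgh : (Int.gcd w h_ : Int) ≤ h_ := Int.le_of_dvd hh (Int.gcd_dvd_right w h_)
    rw [if_pos ⟨hw, hh⟩, loop_eq_gcd w h_ hw hh (min w h_) (le_min hgw hgh),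
      euclid_eq_gcd w h_ (le_of_lt hw) (le_of_lt hh)]
  · rw [if_neg hp]
    have hmin : min w h_ ≤ 0 := by
      push Not at hp
      rcases le_or_gt w 0 with hw | hw
      · exact le_trans (min_le_left _ _) hw
      · exact le_trans (min_le_right _ _) (hp hw)
    rw [PySem.List.pyRange_neg_one_eq_nil hmin, solutionLoop]
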